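-- pv_equiv track=rewrite | github.com/aosullivan/trading | lib/polymarket.py | _is_price_target_question
-- ===== SOURCE A (Python) =====
-- def _is_price_target_question(question: str) -> bool:
--     """Return True only for direct BTC price-target questions."""
--     q_lower = question.lower().strip()
--     if not any(token in q_lower for token in ["bitcoin", "btc"]):
--         return False
--
--     price_patterns = [
--         "price of bitcoin be above",
--         "price of bitcoin be below",
--         "price of bitcoin be between",
--         "bitcoin reach $",
--         "bitcoin hit $",
--         "bitcoin dip to $",
--         "btc reach $",
--         "btc hit $",
--         "btc dip to $",
--         "bitcoin be above $",
--         "bitcoin be below $",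
--     ]
--     return any(pattern in q_lower for pattern in price_patterns)
-- ===== SOURCE B (Python) =====
-- def _is_price_target_question(question: str) -> bool:
--     """Return True only for direct BTC price-target questions."""
--     q = question.lower().strip()
--     # patterns factored into their three grammatical families and generated
--     rel_hit = any("price of bitcoin be " + rel in q
--                   for rel in ("above", "below", "between"))
--     move_hit = any(coin + " " + verb + " $" in q
--                    for coin in ("bitcoin", "btc")
--                    for verb in ("reach", "hit", "dip to"))
--     level_hit = any("bitcoin be " + rel + " $" in q
--                     for rel in ("above", "below"))
--     return rel_hit or move_hit or level_hit
-- ===== Notes on version B (the rewrite author's own statement) =====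
-- stated objective: alternative
-- what changed: Drops A's redundant bitcoin/btc guard (every pattern already contains one of the guard tokens) and replaces A's hard-coded eleven-pattern list by three grammatical pattern families whose patterns are generated combinatorially from coin/verb/relation components.
import Mathlib
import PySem

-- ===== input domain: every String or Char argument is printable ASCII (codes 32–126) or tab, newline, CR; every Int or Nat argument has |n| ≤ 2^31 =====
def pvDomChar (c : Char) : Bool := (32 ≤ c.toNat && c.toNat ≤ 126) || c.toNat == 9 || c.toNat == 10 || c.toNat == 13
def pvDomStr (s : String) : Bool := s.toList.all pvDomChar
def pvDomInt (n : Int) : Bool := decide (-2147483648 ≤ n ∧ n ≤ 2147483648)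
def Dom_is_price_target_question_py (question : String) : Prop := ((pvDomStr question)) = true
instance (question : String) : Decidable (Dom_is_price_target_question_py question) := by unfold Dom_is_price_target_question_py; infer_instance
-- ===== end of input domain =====

-- B drops A's redundant bitcoin/btc guard and generates the eleven patterns
-- combinatorially from three grammatical families instead of a hard-coded list (alternative decomposition).


-- ===== PORT A =====
def pricePatternsA : List String :=
  ["price of bitcoin be above",
   "price of bitcoin be below",
   "price of bitcoin be between",
   "bitcoin reach $",
   "bitcoin hit $",
   "bitcoin dip to $",
   "btc reach $",
   "btc hit $",
   "btc dip to $",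
   "bitcoin be above $",
   "bitcoin be below $"]

def is_price_target_question_py (question : String) : Bool :=
  let qLower := PySem.Str.strip (PySem.Str.lower question)
  if !(["bitcoin", "btc"].any (fun token => PySem.Str.isIn token qLower)) then
    false
  else
    pricePatternsA.any (fun pattern => PySem.Str.isIn pattern qLower)

-- ===== PORT B =====
def is_price_target_question_py_alt (question : String) : Bool :=
  let q := PySem.Str.strip (PySem.Str.lower question)
  let relHit := ["above", "below", "between"].any
    (fun rel => PySem.Str.isIn ("price of bitcoin be " ++ rel) q)
  let moveHit := ["bitcoin", "btc"].any (fun coin =>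
    ["reach", "hit", "dip to"].any (fun verb =>
      PySem.Str.isIn (coin ++ " " ++ verb ++ " $") q))
  let levelHit := ["above", "below"].any
    (fun rel => PySem.Str.isIn ("bitcoin be " ++ rel ++ " $") q)
  relHit || moveHit || levelHit

-- ===== PRECONDITION & SPEC =====
def Spec_is_price_target_question_py (question : String) (out : Bool) : Prop := out = is_price_target_question_py_alt question
instance (question : String) (out : Bool) : Decidable (Spec_is_price_target_question_py question out) := by unfold Spec_is_price_target_question_py; infer_instance

-- ===== CLAIM =====
def Claim_equal_is_price_target_question_py : Prop := ∀ (question : String), Dom_is_price_target_question_py question → Spec_is_price_target_question_py question (is_price_target_question_py question)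

-- ===== LEMMAS AND PROOFS =====

-- B's three generated families enumerate exactly A's eleven literal patterns, in order.
theorem alt_eq_any (question : String) :
    is_price_target_question_py_alt question =
      pricePatternsA.any
        (fun p => PySem.Str.isIn p (PySem.Str.strip (PySem.Str.lower question))) := by
  unfold is_price_target_question_py_alt pricePatternsA
  simp only [List.any_cons, List.any_nil, Bool.or_false, Bool.or_assoc]
  rfl

-- Every price pattern contains "bitcoin" or "btc", so A's guard is redundant.
theorem pattern_has_token (p : String) (hp : p ∈ pricePatternsA) (s : List Char)
    (h : PySem.Chars.isIn p.toList s = true) :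
    PySem.Chars.isIn "bitcoin".toList s = true ∨ PySem.Chars.isIn "btc".toList s = true := by
  rw [PySem.Chars.isIn_iff_infix] at h ⊢
  rw [show (PySem.Chars.isIn "btc".toList s = true) ↔ "btc".toList <:+: s from
    PySem.Chars.isIn_iff_infix _ _]
  fin_cases hp
  all_goals first
    | (left;  exact List.IsInfix.trans (by decide) h)
    | (right; exact List.IsInfix.trans (by decide) h)

-- ===== VERDICT =====
theorem is_price_target_question_py_spec : Claim_equal_is_price_target_question_py := by
  intro question _
  unfold Spec_is_price_target_question_py
  rw [alt_eq_any]
  unfold is_price_target_question_py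
  set q := PySem.Str.strip (PySem.Str.lower question) with hq
  show (if (! ["bitcoin", "btc"].any fun token => PySem.Str.isIn token q) = true then false
      else pricePatternsA.any fun pattern => PySem.Str.isIn pattern q) = _
  split
  · rename_i hneg
    rw [eq_comm, List.any_eq_false]
    intro p hp hpin
    simp only [Bool.not_eq_eq_eq_not, Bool.not_true, List.any_eq_false] at hneg
    rw [PySem.Str.isIn_eq] at hpin
    rcases pattern_has_token p hp q.toList hpin with h | h
    · exact absurd h (by simpa [PySem.Str.isIn_eq] using hneg "bitcoin" (by simp))
    · exact absurd h (by simpa [PySem.Str.isIn_eq] using hneg "btc" (by simp))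
  · rfl
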